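-- pv_equiv track=rewrite | github.com/Meet2147/PPT-Generator | app/utils.py | _truncate_to_balanced
-- ===== SOURCE A (Python) =====
-- from typing import Any, Optional
--
-- def _truncate_to_balanced(candidate: str) -> Optional[str]:
--     """Try to cut at the last position where braces/brackets are balanced."""
--     stack = []
--     in_string = False
--     escape = False
--     last_balanced_end = None
--
--     for i, ch in enumerate(candidate):
--         if in_string:
--             if escape:
--                 escape = False
--                 continue
--             if ch == "\\":
--                 escape = True
--                 continue
--             if ch == '"':
--                 in_string = False
--             continue
--
--         if ch == '"':
--             in_string = True
--             continue
--
--         if ch in "{[":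
--             stack.append(ch)
--         elif ch in "}]":
--             if not stack:
--                 continue
--             open_ch = stack.pop()
--             if (open_ch == "{" and ch != "}") or (open_ch == "[" and ch != "]"):
--                 return None
--             if not stack:
--                 last_balanced_end = i
--
--     if last_balanced_end is None:
--         return None
--     return candidate[: last_balanced_end + 1].strip()
-- ===== SOURCE B (Python) =====
-- from typing import Any, Optional
--
-- def _truncate_to_balanced(candidate: str) -> Optional[str]:
--     """Lexer pass collects structural braces outside strings, then a matcher pass finds the last balanced end."""
--     # Pass 1: lexer — structural characters outside string literals.
--     tokens = []
--     in_string = False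
--     escape = False
--     for i, ch in enumerate(candidate):
--         if in_string:
--             if escape:
--                 escape = False
--             elif ch == "\\":
--                 escape = True
--             elif ch == '"':
--                 in_string = False
--         elif ch == '"':
--             in_string = True
--         elif ch in "{[}]":
--             tokens.append((i, ch))
--     # Pass 2: matcher over the token list.
--     stack = []
--     last_balanced_end = None
--     for i, ch in tokens:
--         if ch in "{[":
--             stack.append(ch)
--         else:
--             if not stack:
--                 continue
--             open_ch = stack.pop()
--             if (open_ch == "{") != (ch == "}"):
--                 return None
--             if not stack:
--                 last_balanced_end = i
--     if last_balanced_end is None: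
--         return None
--     return candidate[: last_balanced_end + 1].strip()
-- ===== Notes on version B (the rewrite author's own statement) =====
-- stated objective: alternative
-- what changed: Splits A's single fused scan into a lexer pass that collects structural brace tokens outside string literals and a separate matcher pass over that token list (with the mismatch test as one boolean inequality), instead of one loop interleaving both concerns.
import Mathlib
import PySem

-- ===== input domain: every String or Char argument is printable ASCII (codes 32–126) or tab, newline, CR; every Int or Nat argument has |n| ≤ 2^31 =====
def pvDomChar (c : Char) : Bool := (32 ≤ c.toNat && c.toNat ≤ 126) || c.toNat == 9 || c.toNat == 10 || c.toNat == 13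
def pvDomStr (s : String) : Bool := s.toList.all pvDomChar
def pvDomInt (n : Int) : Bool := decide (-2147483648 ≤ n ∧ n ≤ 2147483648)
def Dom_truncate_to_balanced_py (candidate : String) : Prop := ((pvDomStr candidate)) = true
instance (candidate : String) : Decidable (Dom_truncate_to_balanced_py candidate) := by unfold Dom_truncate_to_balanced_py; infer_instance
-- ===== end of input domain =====

-- B restructures A into a lexer pass plus a matcher pass (no speed claim); return-value equivalence only.

-- ===== PORT A =====
-- Fused scan: stack, in_string, escape, last_balanced_end in one loop; early `return None`
-- on mismatch is modelled by returning `none` (the final answer is None in that case).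
def truncAGo : List Char → Nat → List Char → Bool → Bool → Option Nat → Option Nat
  | [], _, _, _, _, last => last
  | ch :: rest, i, stack, inStr, esc, last =>
    if inStr then
      if esc then truncAGo rest (i+1) stack true false last
      else if ch = '\\' then truncAGo rest (i+1) stack true true last
      else if ch = '"' then truncAGo rest (i+1) stack false false last
      else truncAGo rest (i+1) stack true false last
    else if ch = '"' then truncAGo rest (i+1) stack true false last
    else if ch = '{' ∨ ch = '[' then truncAGo rest (i+1) (ch :: stack) false false last
    else if ch = '}' ∨ ch = ']' then
      match stack with
      | [] => truncAGo rest (i+1) [] false false last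
      | openCh :: stack' =>
        if (openCh = '{' ∧ ch ≠ '}') ∨ (openCh = '[' ∧ ch ≠ ']') then none
        else if stack' = [] then truncAGo rest (i+1) stack' false false (some i)
        else truncAGo rest (i+1) stack' false false last
    else truncAGo rest (i+1) stack false false last

def truncate_to_balanced_py (candidate : String) : Option String :=
  match truncAGo candidate.toList 0 [] false false none with
  | none => none
  | some i =>
      some (PySem.Str.strip (String.ofList (PySem.List.slice candidate.toList none (some ((i : Int) + 1)))))

-- ===== PORT B =====
-- Pass 1: lexer — (index, char) for each structural character outside string literals.
def truncBLex : List Char → Nat → Bool → Bool → List (Nat × Char)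
  | [], _, _, _ => []
  | ch :: rest, i, inStr, esc =>
    if inStr then
      if esc then truncBLex rest (i+1) true false
      else if ch = '\\' then truncBLex rest (i+1) true true
      else if ch = '"' then truncBLex rest (i+1) false false
      else truncBLex rest (i+1) true false
    else if ch = '"' then truncBLex rest (i+1) true false
    else if ch = '{' ∨ ch = '[' ∨ ch = '}' ∨ ch = ']' then (i, ch) :: truncBLex rest (i+1) false false
    else truncBLex rest (i+1) false false

-- Pass 2: matcher over the token list.
def truncBMatch : List (Nat × Char) → List Char → Option Nat → Option Nat
  | [], _, last => last
  | (i, ch) :: toks, stack, last =>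
    if ch = '{' ∨ ch = '[' then truncBMatch toks (ch :: stack) last
    else
      match stack with
      | [] => truncBMatch toks [] last
      | openCh :: stack' =>
        if (decide (openCh = '{') ≠ decide (ch = '}')) then none
        else if stack' = [] then truncBMatch toks stack' (some i)
        else truncBMatch toks stack' last

def truncate_to_balanced_py_alt (candidate : String) : Option String :=
  match truncBMatch (truncBLex candidate.toList 0 false false) [] none with
  | none => none
  | some i =>
      some (PySem.Str.strip (String.ofList (PySem.List.slice candidate.toList none (some ((i : Int) + 1)))))

-- ===== PRECONDITION & SPEC =====
def Spec_truncate_to_balanced_py (candidate : String) (out : Option String) : Prop := out = truncate_to_balanced_py_alt candidate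
instance (candidate : String) (out : Option String) : Decidable (Spec_truncate_to_balanced_py candidate out) := by unfold Spec_truncate_to_balanced_py; infer_instance

-- ===== CLAIM (what is proved, stated in full; the proofs are below) =====
def Claim_equal_truncate_to_balanced_py : Prop := ∀ (candidate : String), Dom_truncate_to_balanced_py candidate → Spec_truncate_to_balanced_py candidate (truncate_to_balanced_py candidate)

-- ===== LEMMAS AND PROOFS =====

-- Fusing lemma: A's fused scan equals B's matcher run over B's lexer output,
-- provided the stack contains only openers (which the matcher maintains).
theorem truncFuse : ∀ (cs : List Char) (i : Nat) (inStr esc : Bool) (stack : List Char)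
    (last : Option Nat), (∀ c ∈ stack, c = '{' ∨ c = '[') →
    truncAGo cs i stack inStr esc last = truncBMatch (truncBLex cs i inStr esc) stack last := by
  intro cs
  induction cs with
  | nil => intro i inStr esc stack last _; simp [truncAGo, truncBLex, truncBMatch]
  | cons ch rest ih =>
    intro i inStr esc stack last hstack
    cases inStr with
    | true =>
      cases esc with
      | true => simpa [truncAGo, truncBLex] using ih (i+1) true false stack last hstack
      | false =>
        by_cases h1 : ch = '\\'
        · simp [truncAGo, truncBLex, h1]; exact ih (i+1) true true stack last hstack
        · by_cases h2 : ch = '"'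
          · simp [truncAGo, truncBLex, h2]; exact ih (i+1) false false stack last hstack
          · simp [truncAGo, truncBLex, h1, h2]; exact ih (i+1) true false stack last hstack
    | false =>
      by_cases h2 : ch = '"'
      · simp [truncAGo, truncBLex, h2]; exact ih (i+1) true false stack last hstack
      · by_cases hop : ch = '{' ∨ ch = '['
        · have hstack' : ∀ c ∈ ch :: stack, c = '{' ∨ c = '[' := by
            intro c hc
            rcases List.mem_cons.mp hc with h | h
            · subst h; exact hop
            · exact hstack c h
          have hc4 : ch = '{' ∨ ch = '[' ∨ ch = '}' ∨ ch = ']' := by tauto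
          have hlex : truncBLex (ch :: rest) i false esc
              = (i, ch) :: truncBLex rest (i+1) false false := by
            simp [truncBLex, h2, eq_true hc4]
          rw [hlex]
          have hB : truncBMatch ((i, ch) :: truncBLex rest (i+1) false false) stack last
              = truncBMatch (truncBLex rest (i+1) false false) (ch :: stack) last := by
            simp [truncBMatch, eq_true hop]
          rw [hB]
          simp [truncAGo, h2, eq_true hop]
          exact ih (i+1) false false (ch :: stack) last hstack'
        · by_cases hcl : ch = '}' ∨ ch = ']'
          · have hc4 : ch = '{' ∨ ch = '[' ∨ ch = '}' ∨ ch = ']' := Or.inr (Or.inr hcl)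
            have hlex : truncBLex (ch :: rest) i false esc
                = (i, ch) :: truncBLex rest (i+1) false false := by
              simp [truncBLex, h2, eq_true hc4]
            cases stack with
            | nil =>
              have hA : truncAGo (ch :: rest) i [] false esc last
                  = truncAGo rest (i+1) [] false false last := by
                simp [truncAGo, h2, hop, eq_true hcl]
              have hB : truncBMatch ((i, ch) :: truncBLex rest (i+1) false false) [] last
                  = truncBMatch (truncBLex rest (i+1) false false) [] last := by
                simp [truncBMatch, hop]
              rw [hA, hlex, hB]
              exact ih (i+1) false false [] last (by intro c hc; simp at hc)
            | cons openCh stack' =>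
              have hopen : openCh = '{' ∨ openCh = '[' := hstack openCh (by simp)
              have hstackTl : ∀ c ∈ stack', c = '{' ∨ c = '[' := fun c hc => hstack c (by simp [hc])
              have hmis : ((openCh = '{' ∧ ch ≠ '}') ∨ (openCh = '[' ∧ ch ≠ ']')) ↔
                  (decide (openCh = '{') ≠ decide (ch = '}')) := by
                rcases hopen with h | h <;> rcases hcl with h' | h' <;> subst h <;> subst h' <;> simp
              rw [hlex]
              by_cases hm : (openCh = '{' ∧ ch ≠ '}') ∨ (openCh = '[' ∧ ch ≠ ']')
              · have hm' := hmis.mp hm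
                simp [truncAGo, truncBMatch, h2, hop, eq_true hcl, eq_true hm, hm']
              · have hm' : decide (openCh = '{') = decide (ch = '}') := by
                  by_contra h; exact hm (hmis.mpr h)
                by_cases hs : stack' = []
                · have := ih (i+1) false false stack' (some i) hstackTl
                  simp [truncAGo, truncBMatch, h2, hop, eq_true hcl, hm, hm', hs] at this ⊢
                  exact this
                · have := ih (i+1) false false stack' last hstackTl
                  simp [truncAGo, truncBMatch, h2, hop, eq_true hcl, hm, hm', hs] at this ⊢
                  exact this
          · simp [truncAGo, truncBLex, h2, hop, hcl]
            exact ih (i+1) false false stack last hstack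

-- ===== VERDICT (by name: the statement is the Claim_ definition above) =====
theorem truncate_to_balanced_py_spec : Claim_equal_truncate_to_balanced_py := by
  intro candidate _
  unfold Spec_truncate_to_balanced_py truncate_to_balanced_py truncate_to_balanced_py_alt
  rw [truncFuse candidate.toList 0 false false [] none (by intro c hc; simp at hc)]
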